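-- pv_equiv track=rewrite | github.com/hujiayin/tractable_order_selection | select_k/Query.py | gyo_reduce
-- ===== SOURCE A (Python) =====
-- from copy import deepcopy
-- from typing import Dict, Tuple, Optional, List, Set
--
-- def gyo_reduce(hyperedges: List[Set]):
--     """
--     GYO reduction algorithm to test hypergraph acyclicity (robust version).
--     Input: hyperedges - list of sets (each set is a hyperedge)
--     Returns: True if hypergraph is acyclic, False otherwise
--     """
--     edges = deepcopy(hyperedges)
--
--     while True:
--         changed = False
--
--         # Rule 1: remove all edges that are strict subsets of another
--         to_remove = set()
--         for i, e1 in enumerate(edges):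
--             for j, e2 in enumerate(edges):
--                 if i != j and e1.issubset(e2):
--                     to_remove.add(i)
--                     break
--         if to_remove:
--             edges = [e for idx, e in enumerate(edges) if idx not in to_remove]
--             changed = True
--
--         # Rule 2: remove variables that appear only once
--         all_vars = [v for edge in edges for v in edge]
--         var_count = {v: all_vars.count(v) for v in set(all_vars)}
--         new_edges = []
--         for edge in edges:
--             new_edge = {v for v in edge if var_count[v] > 1}
--             if new_edge:
--                 new_edges.append(new_edge)
--         if new_edges != edges:
--             edges = new_edges
--             changed = True
--
--         if not changed:
--             break
--
--     return len(edges) == 0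
-- ===== SOURCE B (Python) =====
-- def gyo_reduce(hyperedges):
--     """GYO acyclicity test, recursive and index-driven: each round builds a
--     multiset index of edge contents (so duplicate detection and the superset
--     scan run over distinct contents), an incremental vertex-occurrence
--     counter, and intersects each survivor with the set of shared vertices."""
--     def reduce(edges):
--         multi = {}
--         for e in edges:
--             multi[e] = multi.get(e, 0) + 1
--         survivors = [e for e in edges
--                      if multi[e] == 1 and not any(e < f for f in multi)]
--         occ = {}
--         for e in survivors:
--             for v in e:
--                 occ[v] = occ.get(v, 0) + 1
--         shared = frozenset(v for v, c in occ.items() if c > 1)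
--         nxt = [e & shared for e in survivors]
--         nxt = [e for e in nxt if e]
--         return edges if nxt == edges else reduce(nxt)
--     return not reduce([frozenset(e) for e in hyperedges])
-- ===== Notes on version B (the rewrite author's own statement) =====
-- stated objective: alternative
-- what changed: B is recursive and index-driven: each round builds a content-multiset dict of frozenset edges so duplicate removal is a count lookup and the superset scan runs over distinct contents only, vertex occurrences are accumulated in one incremental counter dict, and edges are intersected with the precomputed set of shared vertices, instead of A's while loop with an index-pair subset sweep into a to_remove index set and per-variable all_vars.count passes.
import Mathlib
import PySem

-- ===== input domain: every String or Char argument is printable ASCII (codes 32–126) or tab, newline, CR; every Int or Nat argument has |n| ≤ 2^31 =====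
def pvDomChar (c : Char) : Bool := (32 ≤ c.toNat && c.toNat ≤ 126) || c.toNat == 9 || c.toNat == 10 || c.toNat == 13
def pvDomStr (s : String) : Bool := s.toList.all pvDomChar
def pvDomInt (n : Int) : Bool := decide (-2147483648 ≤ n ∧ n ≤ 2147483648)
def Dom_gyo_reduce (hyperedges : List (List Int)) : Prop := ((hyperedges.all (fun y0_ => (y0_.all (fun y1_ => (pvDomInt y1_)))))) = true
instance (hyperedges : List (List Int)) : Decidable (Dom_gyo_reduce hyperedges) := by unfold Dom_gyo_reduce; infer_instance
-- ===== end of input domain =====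

-- B is a recursive, index-driven re-implementation: a content-multiset dict detects
-- duplicate edges and drives the superset scan over distinct contents, a single
-- incremental counter collects vertex occurrences, and survivors are intersected with
-- the precomputed set of shared vertices (alternative decomposition, same cost class;
-- A deepcopies its argument, so neither version mutates the input).

-- Shared vocabulary of both ports: the Python sets are modelled as PySem.Set Int
-- (both entry points convert each inner list through PySem.Set.ofList, as Python
-- receives the hyperedges as sets); Python '==' on a list of sets is length +
-- elementwise set equality.
def pvSize (es : List (List Int)) : Nat := (es.map (fun e => e.length + 1)).sum

def pvListSetEq (xs ys : List (List Int)) : Bool :=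
  xs.length == ys.length && (List.zip xs ys).all (fun p => PySem.Set.equal p.1 p.2)

-- ===== PORT A =====
-- inner loop 'for j, e2 in enumerate(edges): if i != j and e1.issubset(e2): …; break'
def pvChkA (i : Nat) (e1 : List Int) : List (List Int) → Nat → Bool
  | [], _ => false
  | e2 :: tl, j => (decide (i ≠ j) && PySem.Set.issubset e1 e2) || pvChkA i e1 tl (j + 1)

-- outer loop building to_remove (a set of indices, here the increasing list of them)
def pvToRemA (all : List (List Int)) : List (List Int) → Nat → List Nat
  | [], _ => []
  | e1 :: tl, i => if pvChkA i e1 all 0 then i :: pvToRemA all tl (i + 1) else pvToRemA all tl (i + 1)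

-- '[e for idx, e in enumerate(edges) if idx not in to_remove]'
def pvDropIdxs (rem : List Nat) : List (List Int) → Nat → List (List Int)
  | [], _ => []
  | e :: tl, i => if rem.contains i then pvDropIdxs rem tl (i + 1) else e :: pvDropIdxs rem tl (i + 1)

def pvAllVars (es : List (List Int)) : List Int := es.flatMap (fun e => e)

-- 'var_count = {v: all_vars.count(v) for v in set(all_vars)}'
def pvVarCountA (es : List (List Int)) : PySem.Dict Int Int :=
  (PySem.Set.ofList (pvAllVars es)).foldl
    (fun d v => d.insert v ((pvAllVars es).count v : Int)) PySem.Dict.empty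

-- rule-2 loop; 'var_count[v]' never raises (v is always a key), so getD is exact here
def pvRule2 (cnt : PySem.Dict Int Int) : List (List Int) → List (List Int)
  | [] => []
  | e :: tl =>
      let ne := e.filter (fun v => cnt.getD v 0 > 1)
      if ne.isEmpty then pvRule2 cnt tl else ne :: pvRule2 cnt tl

-- ---- lemmas the ports' termination proofs cite ----
theorem pvSize_cons (e : List Int) (tl : List (List Int)) :
    pvSize (e :: tl) = e.length + 1 + pvSize tl := by
  simp [pvSize]

theorem pvSize_sublist {s l : List (List Int)} (h : List.Sublist s l) :
    pvSize s + (l.length - s.length) ≤ pvSize l := by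
  induction h with
  | slnil => simp
  | cons e h ih =>
      have := h.length_le
      simp only [pvSize_cons, List.length_cons]
      omega
  | cons₂ e h ih =>
      have := h.length_le
      simp only [pvSize_cons, List.length_cons]
      omega

-- the generic shape of rule 2 (a filterMap), used by both ports' size arguments
theorem pvR2_size_le (p : Int → Bool) (es : List (List Int)) :
    pvSize (es.filterMap (fun e => if (e.filter p).isEmpty then none else some (e.filter p))) ≤ pvSize es := by
  induction es with
  | nil => simp
  | cons e tl ih =>
      have hf : (e.filter p).length ≤ e.length := List.length_filter_le p e
      by_cases h : (e.filter p).isEmpty = true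
      · rw [List.filterMap_cons_none (by simp [h]), pvSize_cons]
        omega
      · simp only [List.filterMap_cons, if_neg h]
        rw [pvSize_cons, pvSize_cons]
        omega

theorem pvR2_eq_of_size_eq (p : Int → Bool) (es : List (List Int))
    (h : pvSize (es.filterMap (fun e => if (e.filter p).isEmpty then none else some (e.filter p))) = pvSize es) :
    es.filterMap (fun e => if (e.filter p).isEmpty then none else some (e.filter p)) = es := by
  induction es with
  | nil => simp
  | cons e tl ih =>
      have hle := pvR2_size_le p tl
      have hf : (e.filter p).length ≤ e.length := List.length_filter_le p e
      by_cases hem : (e.filter p).isEmpty = true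
      · rw [List.filterMap_cons_none (by simp [hem]), pvSize_cons] at h
        omega
      · simp only [List.filterMap_cons, if_neg hem] at h ⊢
        rw [pvSize_cons, pvSize_cons] at h
        have hfe : (e.filter p).length = e.length := by omega
        have he : e.filter p = e := List.Sublist.eq_of_length List.filter_sublist hfe
        rw [he] at h ⊢
        rw [ih (by omega)]

theorem pvRule2_eq_filterMap (cnt : PySem.Dict Int Int) (es : List (List Int)) :
    pvRule2 cnt es = es.filterMap (fun e =>
      if (e.filter (fun v => cnt.getD v 0 > 1)).isEmpty then none
      else some (e.filter (fun v => cnt.getD v 0 > 1))) := by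
  induction es with
  | nil => rfl
  | cons e tl ih =>
      by_cases h : (e.filter (fun v => cnt.getD v 0 > 1)).isEmpty = true
      · rw [List.filterMap_cons_none (by simp [h])]
        simp only [pvRule2]
        rw [if_pos h, ih]
      · simp only [List.filterMap_cons, if_neg h]
        simp only [pvRule2]
        rw [if_neg h, ih]

theorem pvListSetEq_refl (es : List (List Int)) : pvListSetEq es es = true := by
  simp only [pvListSetEq, beq_self_eq_true, Bool.true_and, List.all_eq_true]
  intro p hp
  have : p.1 = p.2 := by
    induction es with
    | nil => simp at hp
    | cons e tl ih =>
        simp only [List.zip_cons_cons, List.mem_cons] at hp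
        rcases hp with h | h
        · rw [h]
        · exact ih h
  rw [this]
  exact (PySem.Set.equal_iff _ _).mpr (fun x => Iff.rfl)

theorem pvListSetEq_ne {xs ys : List (List Int)} (h : pvListSetEq xs ys = false) : xs ≠ ys := by
  intro he; rw [he, pvListSetEq_refl] at h; cases h

theorem pvDropIdxs_sublist (rem : List Nat) : ∀ (es : List (List Int)) (i : Nat),
    List.Sublist (pvDropIdxs rem es i) es := by
  intro es
  induction es with
  | nil => intro i; simp [pvDropIdxs]
  | cons e tl ih =>
      intro i
      rw [pvDropIdxs]
      by_cases h : rem.contains i = true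
      · rw [if_pos h]; exact (ih (i + 1)).cons e
      · rw [if_neg h]; exact (ih (i + 1)).cons₂ e

theorem pvDropIdxs_length_lt (rem : List Nat) : ∀ (es : List (List Int)) (i j : Nat),
    rem.contains j = true → i ≤ j → j < i + es.length →
    (pvDropIdxs rem es i).length < es.length := by
  intro es
  induction es with
  | nil => intro i j _ hij hlt; simp at hlt; omega
  | cons e tl ih =>
      intro i j hj hij hlt
      by_cases h : rem.contains i
      · have := ((pvDropIdxs_sublist rem tl (i + 1)).length_le)
        simp only [pvDropIdxs, h, if_pos, List.length_cons]
        omega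
      · have hne : j ≠ i := by rintro rfl; rw [hj] at h; exact h rfl
        simp only [pvDropIdxs, h, Bool.false_eq_true, if_neg, List.length_cons, not_false_iff]
        have := ih (i + 1) j hj (by omega) (by simp at hlt ⊢; omega)
        omega

theorem pvToRemA_mem (all : List (List Int)) : ∀ (rest : List (List Int)) (i j : Nat),
    j ∈ pvToRemA all rest i ↔
      ∃ k, ∃ hk : k < rest.length, j = i + k ∧ pvChkA (i + k) rest[k] all 0 = true := by
  intro rest
  induction rest with
  | nil => intro i j; simp [pvToRemA]
  | cons e tl ih =>
      intro i j
      constructor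
      · intro h
        by_cases hc : pvChkA i e all 0
        · simp only [pvToRemA, hc, if_pos, List.mem_cons] at h
          rcases h with rfl | h
          · exact ⟨0, by simp, by simp, by simpa using hc⟩
          · rcases (ih (i + 1) j).mp h with ⟨k, hk, rfl, hch⟩
            exact ⟨k + 1, by simpa using hk, by omega,
              by have : i + 1 + k = i + (k + 1) := by omega
                 rw [this] at hch; simpa using hch⟩
        · simp only [pvToRemA, hc, Bool.false_eq_true, if_neg, not_false_iff] at h
          rcases (ih (i + 1) j).mp h with ⟨k, hk, rfl, hch⟩
          exact ⟨k + 1, by simpa using hk, by omega,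
            by have : i + 1 + k = i + (k + 1) := by omega
               rw [this] at hch; simpa using hch⟩
      · rintro ⟨k, hk, rfl, hch⟩
        match k, hk with
        | 0, _ =>
            have hc : pvChkA i e all 0 = true := by simpa using hch
            simp [pvToRemA, hc]
        | k' + 1, hk =>
            have : i + (k' + 1) = (i + 1) + k' := by omega
            rw [this] at hch ⊢
            have hmem := (ih (i + 1) ((i + 1) + k')).mpr
              ⟨k', by simpa using hk, rfl, by simpa using hch⟩
            by_cases hc : pvChkA i e all 0 <;> simp [pvToRemA, hc, hmem]

theorem pvRemNonempty_len (es : List (List Int)) (h : (pvToRemA es es 0).isEmpty = false) :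
    (pvDropIdxs (pvToRemA es es 0) es 0).length < es.length := by
  obtain ⟨j, hj⟩ : ∃ j, j ∈ pvToRemA es es 0 := by
    cases hq : pvToRemA es es 0 with
    | nil => rw [hq] at h; simp at h
    | cons a tl => exact ⟨a, by exact List.mem_cons_self⟩
  rcases (pvToRemA_mem es es 0 j).mp hj with ⟨k, hk, rfl, _⟩
  exact pvDropIdxs_length_lt _ es 0 (0 + k) (by simpa using hj) (by omega) (by omega)

theorem pvDecA (es edges1 : List (List Int)) (cnt : PySem.Dict Int Int)
    (h1 : edges1 = if (pvToRemA es es 0).isEmpty then es else pvDropIdxs (pvToRemA es es 0) es 0)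
    (h : (pvToRemA es es 0).isEmpty = false ∨ pvListSetEq (pvRule2 cnt edges1) edges1 = false) :
    pvSize (if pvListSetEq (pvRule2 cnt edges1) edges1 then edges1 else pvRule2 cnt edges1) < pvSize es := by
  have hr2le : pvSize (pvRule2 cnt edges1) ≤ pvSize edges1 := by
    rw [pvRule2_eq_filterMap]; exact pvR2_size_le _ _
  by_cases hrem : (pvToRemA es es 0).isEmpty = false
  · have hlen := pvRemNonempty_len es hrem
    have hsub := pvSize_sublist (pvDropIdxs_sublist (pvToRemA es es 0) es 0)
    have h1' : edges1 = pvDropIdxs (pvToRemA es es 0) es 0 := by rw [h1, if_neg (by simp [hrem])]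
    have hlt : pvSize edges1 < pvSize es := by
      rw [h1']
      have := (pvDropIdxs_sublist (pvToRemA es es 0) es 0).length_le
      omega
    split <;> omega
  · have hrt : (pvToRemA es es 0).isEmpty = true := by revert hrem; cases (pvToRemA es es 0).isEmpty <;> simp
    have h1' : edges1 = es := by rw [h1, if_pos hrt]
    have hne : pvListSetEq (pvRule2 cnt edges1) edges1 = false := by
      rcases h with h | h
      · rw [h] at hrt; cases hrt
      · exact h
    rw [if_neg (by simp [hne])]
    have hnee : pvRule2 cnt edges1 ≠ edges1 := pvListSetEq_ne hne
    have : pvSize (pvRule2 cnt edges1) ≠ pvSize edges1 := by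
      intro hsz
      exact hnee (by rw [pvRule2_eq_filterMap] at hsz ⊢; exact pvR2_eq_of_size_eq _ _ hsz)
    rw [h1'] at hr2le this ⊢
    omega

def pvLoopA (edges : List (List Int)) : Bool :=
  let rem := pvToRemA edges edges 0
  let edges1 := if rem.isEmpty then edges else pvDropIdxs rem edges 0
  let newE := pvRule2 (pvVarCountA edges1) edges1
  if h : rem.isEmpty = false ∨ pvListSetEq newE edges1 = false then
    -- 'changed' was set; Python continues with new_edges when rule 2 changed, else with edges1
    pvLoopA (if pvListSetEq newE edges1 then edges1 else newE)
  else
    edges.length == 0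
termination_by pvSize edges
decreasing_by exact pvDecA edges _ _ rfl h

def gyo_reduce (hyperedges : List (List Int)) : Bool :=
  pvLoopA (hyperedges.map PySem.Set.ofList)

-- ===== PORT B =====
-- 'multi': the dict of frozenset contents, keyed by set equality (hash dict on frozensets)
def pvMAdd (m : List (List Int × Int)) (e : List Int) : List (List Int × Int) :=
  match m with
  | [] => [(e, 1)]
  | (f, c) :: tl => if PySem.Set.equal f e then (f, c + 1) :: tl else (f, c) :: pvMAdd tl e

def pvMGet (m : List (List Int × Int)) (e : List Int) : Int :=
  match m with
  | [] => 0
  | (f, c) :: tl => if PySem.Set.equal f e then c else pvMGet tl e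

-- 'survivors = [e for e in edges if multi[e] == 1 and not any(e < f for f in multi)]'
def pvSurvB (edges : List (List Int)) : List (List Int) :=
  let multi := edges.foldl pvMAdd []
  edges.filter (fun e =>
    (pvMGet multi e == 1) &&
    !(multi.any (fun fc => PySem.Set.issubset e fc.1 && !PySem.Set.equal e fc.1)))

-- the incremental occurrence counter 'occ'
def pvOcc (surv : List (List Int)) : PySem.Dict Int Int :=
  surv.foldl (fun d e => e.foldl (fun d v => d.insert v (d.getD v 0 + 1)) d) PySem.Dict.empty

-- 'shared = frozenset(v for v, c in occ.items() if c > 1)'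
def pvShared (surv : List (List Int)) : PySem.Set Int :=
  PySem.Set.ofList (((pvOcc surv).items.filter (fun p => p.2 > 1)).map Prod.fst)

-- 'nxt = [e & shared for e in survivors]; nxt = [e for e in nxt if e]'
def pvStepB (edges : List (List Int)) : List (List Int) :=
  ((pvSurvB edges).map (fun e => PySem.Set.inter e (pvShared (pvSurvB edges)))).filter
    (fun e => !e.isEmpty)

-- ---- lemmas pvReduceB's termination proof cites ----
theorem pvMapFilter_eq_filterMap (p : Int → Bool) (l : List (List Int)) :
    (l.map (fun e => e.filter p)).filter (fun e => !e.isEmpty) =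
      l.filterMap (fun e => if (e.filter p).isEmpty then none else some (e.filter p)) := by
  induction l with
  | nil => rfl
  | cons e tl ih =>
      by_cases h : (e.filter p).isEmpty = true
      · rw [List.filterMap_cons_none (by simp [h]), List.map_cons, List.filter_cons_of_neg (by simp [h]), ih]
      · rw [List.map_cons, List.filter_cons_of_pos (by simp [h])]
        simp only [List.filterMap_cons, if_neg h]
        rw [ih]

theorem pvStepB_shape (es : List (List Int)) :
    pvStepB es = (es.filter (fun e =>
        (pvMGet (es.foldl pvMAdd []) e == 1) &&
        !((es.foldl pvMAdd []).any (fun fc => PySem.Set.issubset e fc.1 && !PySem.Set.equal e fc.1)))).filterMap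
      (fun e => if (e.filter (fun v => PySem.Set.contains (pvShared (pvSurvB es)) v)).isEmpty then none
                else some (e.filter (fun v => PySem.Set.contains (pvShared (pvSurvB es)) v))) := by
  have h1 : (fun e => PySem.Set.inter e (pvShared (pvSurvB es))) =
      (fun e => e.filter (fun v => PySem.Set.contains (pvShared (pvSurvB es)) v)) := rfl
  rw [pvStepB, h1, pvMapFilter_eq_filterMap]
  rfl

theorem pvR2_filter_lt (p : Int → Bool) (q : List Int → Bool) (es : List (List Int))
    (h : pvListSetEq ((es.filter q).filterMap
        (fun e => if (e.filter p).isEmpty then none else some (e.filter p))) es = false) :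
    pvSize ((es.filter q).filterMap
        (fun e => if (e.filter p).isEmpty then none else some (e.filter p))) < pvSize es := by
  have hsub : List.Sublist (es.filter q) es := List.filter_sublist
  have h1 := pvSize_sublist hsub
  have h2 := hsub.length_le
  have hle := pvR2_size_le p (es.filter q)
  by_cases heq : pvSize ((es.filter q).filterMap
      (fun e => if (e.filter p).isEmpty then none else some (e.filter p))) = pvSize es
  · exfalso
    have hks : pvSize (es.filter q) = pvSize es := by omega
    have hlen : (es.filter q).length = es.length := by omega
    have hke : es.filter q = es := List.Sublist.eq_of_length hsub hlen
    have hfm := pvR2_eq_of_size_eq p (es.filter q) (by omega)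
    rw [hfm, hke, pvListSetEq_refl] at h
    cases h
  · omega

theorem pvDecB (es : List (List Int)) (h : pvListSetEq (pvStepB es) es = false) :
    pvSize (pvStepB es) < pvSize es := by
  rw [pvStepB_shape] at h ⊢
  exact pvR2_filter_lt _ _ _ h

-- 'return edges if nxt == edges else reduce(nxt)'
def pvReduceB (edges : List (List Int)) : List (List Int) :=
  if h : pvListSetEq (pvStepB edges) edges = true then edges
  else pvReduceB (pvStepB edges)
termination_by pvSize edges
decreasing_by exact pvDecB edges (by simpa using h)

def gyo_reduce_alt (hyperedges : List (List Int)) : Bool :=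
  (pvReduceB (hyperedges.map PySem.Set.ofList)).isEmpty

-- ===== PRECONDITION & SPEC =====
def Spec_gyo_reduce (hyperedges : List (List Int)) (out : Bool) : Prop := out = gyo_reduce_alt hyperedges
instance (hyperedges : List (List Int)) (out : Bool) : Decidable (Spec_gyo_reduce hyperedges out) := by unfold Spec_gyo_reduce; infer_instance

-- ===== CLAIM (what is proved, stated in full; the proofs are below) =====
def Claim_equal_gyo_reduce : Prop := ∀ (hyperedges : List (List Int)), Dom_gyo_reduce hyperedges → Spec_gyo_reduce hyperedges (gyo_reduce hyperedges)

-- ===== LEMMAS AND PROOFS =====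

-- Set.equal is an equivalence, and issubset respects it on the right
theorem pvEqSymm (x y : List Int) : PySem.Set.equal x y = PySem.Set.equal y x := by
  cases hx : PySem.Set.equal x y with
  | true =>
      symm
      rw [PySem.Set.equal_iff]
      intro a
      exact ((PySem.Set.equal_iff x y).mp hx a).symm
  | false =>
      cases hy : PySem.Set.equal y x with
      | false => rfl
      | true =>
          have : PySem.Set.equal x y = true := by
            rw [PySem.Set.equal_iff]
            intro a
            exact ((PySem.Set.equal_iff y x).mp hy a).symm
          rw [this] at hx
          cases hx

theorem pvEqTrans {x y z : List Int} (h1 : PySem.Set.equal x y = true)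
    (h2 : PySem.Set.equal y z = true) : PySem.Set.equal x z = true := by
  rw [PySem.Set.equal_iff] at h1 h2 ⊢
  intro a
  exact (h1 a).trans (h2 a)

theorem pvSubCong (e : List Int) {x y : List Int} (h : PySem.Set.equal x y = true) :
    PySem.Set.issubset e x = PySem.Set.issubset e y := by
  have hm := (PySem.Set.equal_iff x y).mp h
  cases hx : PySem.Set.issubset e x with
  | true =>
      symm
      rw [PySem.Set.issubset_iff]
      intro a ha
      exact (hm a).mp ((PySem.Set.issubset_iff e x).mp hx a ha)
  | false =>
      cases hy : PySem.Set.issubset e y with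
      | false => rfl
      | true =>
          have : PySem.Set.issubset e x = true := by
            rw [PySem.Set.issubset_iff]
            intro a ha
            exact (hm a).mpr ((PySem.Set.issubset_iff e y).mp hy a ha)
          rw [this] at hx
          cases hx

theorem pvEqCongR (e : List Int) {x y : List Int} (h : PySem.Set.equal x y = true) :
    PySem.Set.equal e x = PySem.Set.equal e y := by
  cases hx : PySem.Set.equal e x with
  | true => exact (pvEqTrans hx h).symm
  | false =>
      cases hy : PySem.Set.equal e y with
      | false => rfl
      | true =>
          have : PySem.Set.equal e x = true := pvEqTrans hy (by rw [pvEqSymm]; exact h)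
          rw [this] at hx
          cases hx

-- looking up the content multiset counts set-equal occurrences
theorem pvMGet_add (m : List (List Int × Int)) (f e : List Int) :
    pvMGet (pvMAdd m f) e = pvMGet m e + (if PySem.Set.equal e f then 1 else 0) := by
  induction m with
  | nil =>
      simp only [pvMAdd, pvMGet, pvEqSymm f e]
      split <;> simp
  | cons gc tl ih =>
      obtain ⟨g, c⟩ := gc
      by_cases hgf : PySem.Set.equal g f = true
      · simp only [pvMAdd, if_pos hgf, pvMGet]
        by_cases hge : PySem.Set.equal g e = true
        · have hef : PySem.Set.equal e f = true :=
            pvEqTrans (by rw [pvEqSymm]; exact hge) hgf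
          rw [if_pos hge, if_pos hge, if_pos hef]
        · have hef : PySem.Set.equal e f = false := by
            cases hx : PySem.Set.equal e f with
            | false => rfl
            | true =>
                have : PySem.Set.equal g e = true :=
                  pvEqTrans hgf (by rw [pvEqSymm]; exact hx)
                rw [this] at hge
                simp at hge
          rw [if_neg (by simp [hge]), if_neg (by simp [hge]), if_neg (by simp [hef])]
          omega
      · simp only [pvMAdd, if_neg hgf, pvMGet]
        by_cases hge : PySem.Set.equal g e = true
        · have hef : PySem.Set.equal e f = false := by
            cases hx : PySem.Set.equal e f with
            | false => rfl
            | true =>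
                have : PySem.Set.equal g f = true := pvEqTrans hge hx
                rw [this] at hgf
                simp at hgf
          rw [if_pos hge, if_pos hge, if_neg (by simp [hef])]
          omega
        · rw [if_neg (by simp [hge]), if_neg (by simp [hge]), ih]

theorem pvMGet_foldl (e : List Int) : ∀ (l : List (List Int)) (m : List (List Int × Int)),
    pvMGet (l.foldl pvMAdd m) e = pvMGet m e + (l.countP (fun f => PySem.Set.equal e f) : Int) := by
  intro l
  induction l with
  | nil => intro m; simp
  | cons f tl ih =>
      intro m
      rw [List.foldl_cons, ih, pvMGet_add, List.countP_cons]
      by_cases h : PySem.Set.equal e f = true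
      · rw [if_pos h, if_pos (by simp [h])]
        push_cast
        ring
      · rw [if_neg (by simp [h]), if_neg (by simp [h])]
        push_cast
        ring

-- an existential scan over the distinct contents equals the scan over all edges,
-- for any predicate invariant under set equality
theorem pvAny_add (p : List Int → Bool) (hp : ∀ x y, PySem.Set.equal x y = true → p x = p y)
    (m : List (List Int × Int)) (f : List Int) :
    (pvMAdd m f).any (fun fc => p fc.1) = (m.any (fun fc => p fc.1) || p f) := by
  induction m with
  | nil => simp [pvMAdd]
  | cons gc tl ih =>
      obtain ⟨g, c⟩ := gc
      by_cases hgf : PySem.Set.equal g f = true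
      · have hpg : p g = p f := hp _ _ hgf
        simp only [pvMAdd, if_pos hgf, List.any_cons, hpg]
        cases p f <;> simp
      · simp only [pvMAdd, if_neg hgf, List.any_cons, ih]
        cases p g <;> simp

theorem pvAny_foldl (p : List Int → Bool) (hp : ∀ x y, PySem.Set.equal x y = true → p x = p y) :
    ∀ (l : List (List Int)) (m : List (List Int × Int)),
      (l.foldl pvMAdd m).any (fun fc => p fc.1) = (m.any (fun fc => p fc.1) || l.any p) := by
  intro l
  induction l with
  | nil => intro m; simp
  | cons f tl ih =>
      intro m
      rw [List.foldl_cons, ih, pvAny_add p hp, List.any_cons]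
      cases m.any (fun fc => p fc.1) <;> cases p f <;> simp

-- B's survivor test coincides with A's content-level keep test, edge by edge
theorem pvKeepB_eq (es : List (List Int)) (e : List Int) :
    ((pvMGet (es.foldl pvMAdd []) e == 1) &&
      !((es.foldl pvMAdd []).any (fun fc => PySem.Set.issubset e fc.1 && !PySem.Set.equal e fc.1))) =
    (((es.countP fun f => PySem.Set.equal e f) == 1) &&
      !(es.any fun f => PySem.Set.issubset e f && !PySem.Set.equal e f)) := by
  have hc : pvMGet (es.foldl pvMAdd []) e = ((es.countP fun f => PySem.Set.equal e f : Nat) : Int) := by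
    rw [pvMGet_foldl]
    simp [pvMGet]
  have hcnt : (pvMGet (es.foldl pvMAdd []) e == 1) = ((es.countP fun f => PySem.Set.equal e f) == 1) := by
    rw [hc]
    cases h : ((es.countP fun f => PySem.Set.equal e f) == 1) with
    | true =>
        have := beq_iff_eq.mp h
        simp [beq_iff_eq, this]
    | false =>
        have : (es.countP fun f => PySem.Set.equal e f) ≠ 1 := by
          intro hx; rw [beq_iff_eq.mpr hx] at h; cases h
        simp only [beq_eq_false_iff_ne, ne_eq]
        omega
  have hany : ((es.foldl pvMAdd []).any (fun fc => PySem.Set.issubset e fc.1 && !PySem.Set.equal e fc.1)) =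
      (es.any fun f => PySem.Set.issubset e f && !PySem.Set.equal e f) := by
    rw [pvAny_foldl (fun f => PySem.Set.issubset e f && !PySem.Set.equal e f)
      (by intro x y hxy
          show (PySem.Set.issubset e x && !PySem.Set.equal e x) =
            (PySem.Set.issubset e y && !PySem.Set.equal e y)
          rw [pvSubCong e hxy, pvEqCongR e hxy])]
    simp
  rw [hcnt, hany]

-- keys of the occurrence counter = the distinct flattened variables
theorem pvOcc_keys_aux : ∀ (surv : List (List Int)) (d : PySem.Dict Int Int),
    (surv.foldl (fun d e => e.foldl (fun d v => d.insert v (d.getD v 0 + 1)) d) d).keys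
      = PySem.Set.update d.keys (pvAllVars surv) := by
  intro surv
  induction surv with
  | nil => intro d; simp [pvAllVars, PySem.Set.update]
  | cons e tl ih =>
      intro d
      rw [List.foldl_cons, ih, PySem.Dict.keys_foldl_insert]
      have h1 : pvAllVars (e :: tl) = e ++ pvAllVars tl := by simp [pvAllVars]
      rw [h1, PySem.Set.update_append]

theorem pvOcc_keys (surv : List (List Int)) :
    (pvOcc surv).keys = PySem.Set.ofList (pvAllVars surv) := by
  rw [pvOcc, pvOcc_keys_aux]
  rw [show (PySem.Dict.empty : PySem.Dict Int Int).keys = ([] : List Int) from rfl]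
  exact PySem.Set.update_empty _

-- the occurrence counter computes flattened counts (shared with A's var_count)
theorem pvCntB_getD_aux (v : Int) : ∀ (kept : List (List Int)) (d : PySem.Dict Int Int),
    (kept.foldl (fun d e => e.foldl (fun d v => d.insert v (d.getD v 0 + 1)) d) d).getD v 0 =
      d.getD v 0 + ((pvAllVars kept).count v : Int) := by
  intro kept
  induction kept with
  | nil => intro d; simp [pvAllVars]
  | cons e tl ih =>
      intro d
      rw [List.foldl_cons, ih, PySem.Dict.getD_foldl_insert_add_one]
      have : pvAllVars (e :: tl) = e ++ pvAllVars tl := by simp [pvAllVars]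
      rw [this, List.count_append]
      push_cast
      ring

theorem pvOcc_getD (surv : List (List Int)) (v : Int) :
    (pvOcc surv).getD v 0 = ((pvAllVars surv).count v : Int) := by
  rw [pvOcc, pvCntB_getD_aux]
  simp

-- membership in 'shared' is exactly 'occurs more than once'
theorem pvShared_contains (surv : List (List Int)) (v : Int) :
    PySem.Set.contains (pvShared surv) v = decide (1 < (pvAllVars surv).count v) := by
  have hnd : (pvOcc surv).keys.Nodup := by
    rw [pvOcc_keys]
    exact PySem.Set.nodup_ofList _
  have hitems := PySem.Dict.items_eq_map_keys (pvOcc surv) hnd 0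
  have hsh : pvShared surv =
      PySem.Set.ofList ((pvOcc surv).keys.filter (fun k => decide ((pvOcc surv).getD k 0 > 1))) := by
    rw [pvShared, hitems, List.filter_map, List.map_map]
    simp [Function.comp_def]
  rw [hsh]
  by_cases h1 : 1 < (pvAllVars surv).count v
  · have hmemk : v ∈ (pvOcc surv).keys := by
      rw [pvOcc_keys, PySem.Set.mem_ofList]
      exact List.count_pos_iff.mp (by omega)
    have hmem : v ∈ PySem.Set.ofList
        ((pvOcc surv).keys.filter (fun k => decide ((pvOcc surv).getD k 0 > 1))) := by
      rw [PySem.Set.mem_ofList, List.mem_filter]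
      refine ⟨hmemk, ?_⟩
      rw [pvOcc_getD]
      simp only [decide_eq_true_eq]
      exact_mod_cast h1
    rw [decide_eq_true h1]
    exact (PySem.Set.contains_iff _ _).mpr hmem
  · have hnmem : v ∉ PySem.Set.ofList
        ((pvOcc surv).keys.filter (fun k => decide ((pvOcc surv).getD k 0 > 1))) := by
      intro hm
      rw [PySem.Set.mem_ofList] at hm
      rcases List.mem_filter.mp hm with ⟨_, hgt⟩
      rw [pvOcc_getD] at hgt
      simp only [decide_eq_true_eq] at hgt
      exact h1 (by exact_mod_cast hgt)
    rw [decide_eq_false h1]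
    cases hc : PySem.Set.contains (PySem.Set.ofList
        ((pvOcc surv).keys.filter (fun k => decide ((pvOcc surv).getD k 0 > 1)))) v with
    | false => rfl
    | true => exact absurd ((PySem.Set.contains_iff _ _).mp hc) hnmem

theorem pvListSetEq_length {xs ys : List (List Int)} (h : pvListSetEq xs ys = true) :
    xs.length = ys.length := by
  simp only [pvListSetEq, Bool.and_eq_true, beq_iff_eq] at h
  exact h.1

theorem pvListSetEq_false_of_length {xs ys : List (List Int)} (h : xs.length ≠ ys.length) :
    pvListSetEq xs ys = false := by
  cases hq : pvListSetEq xs ys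
  · rfl
  · exact absurd (pvListSetEq_length hq) h

-- two distinct positions satisfying p force countP ≥ 2, and conversely
theorem pvCountP_two (p : List Int → Bool) (l : List (List Int)) :
    ∀ (i j : Nat) (hi : i < l.length) (hj : j < l.length), i ≠ j →
      p l[i] = true → p l[j] = true → 2 ≤ l.countP p := by
  induction l with
  | nil => intro i j hi _ _ _ _; simp at hi
  | cons e tl ih =>
      intro i j hi hj hne hpi hpj
      match i, j with
      | 0, 0 => omega
      | 0, j + 1 =>
          have hj' : j < tl.length := by simpa using hj
          have h1 : 0 < tl.countP p :=
            List.countP_pos_iff.mpr ⟨tl[j]'hj', List.getElem_mem _, by simpa using hpj⟩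
          have hpe : p e = true := by simpa using hpi
          rw [List.countP_cons, if_pos hpe]
          omega
      | i + 1, 0 =>
          have hi' : i < tl.length := by simpa using hi
          have h1 : 0 < tl.countP p :=
            List.countP_pos_iff.mpr ⟨tl[i]'hi', List.getElem_mem _, by simpa using hpi⟩
          have hpe : p e = true := by simpa using hpj
          rw [List.countP_cons, if_pos hpe]
          omega
      | i + 1, j + 1 =>
          have := ih i j (by simpa using hi) (by simpa using hj) (by omega)
            (by simpa using hpi) (by simpa using hpj)
          rw [List.countP_cons]
          split <;> omega

theorem pvCountP_two_exists (p : List Int → Bool) (l : List (List Int)) (h : 2 ≤ l.countP p) :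
    ∃ i j, ∃ hi : i < l.length, ∃ hj : j < l.length,
      i ≠ j ∧ p l[i] = true ∧ p l[j] = true := by
  induction l with
  | nil => simp at h
  | cons e tl ih =>
      rw [List.countP_cons] at h
      by_cases hpe : p e = true
      · rw [if_pos hpe] at h
        obtain ⟨a, ha, hpa⟩ := List.countP_pos_iff.mp (show 0 < tl.countP p by omega)
        obtain ⟨k, hk, rfl⟩ := List.mem_iff_getElem.mp ha
        exact ⟨0, k + 1, by simp, by simpa using hk, by omega, by simpa using hpe, by simpa using hpa⟩
      · have h2 : 2 ≤ tl.countP p := by rw [if_neg hpe] at h; omega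
        obtain ⟨i, j, hi, hj, hne, hpi, hpj⟩ := ih h2
        exact ⟨i + 1, j + 1, by simpa using hi, by simpa using hj, by omega,
          by simpa using hpi, by simpa using hpj⟩

-- the inner break-loop of A tests exactly 'some other index j holds a superset'
theorem pvChkA_iff (i : Nat) (e1 : List Int) : ∀ (rest : List (List Int)) (j : Nat),
    pvChkA i e1 rest j = true ↔
      ∃ k, ∃ hk : k < rest.length, i ≠ j + k ∧ PySem.Set.issubset e1 rest[k] = true := by
  intro rest
  induction rest with
  | nil => intro j; simp [pvChkA]
  | cons e2 tl ih =>
      intro j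
      simp only [pvChkA, Bool.or_eq_true, Bool.and_eq_true, decide_eq_true_eq]
      constructor
      · rintro (⟨hne, hsub⟩ | h)
        · exact ⟨0, by simp, by omega, by simpa using hsub⟩
        · rcases (ih (j + 1)).mp h with ⟨k, hk, hne, hsub⟩
          refine ⟨k + 1, by simpa using hk, by omega, ?_⟩
          simpa using hsub
      · rintro ⟨k, hk, hne, hsub⟩
        match k, hk with
        | 0, _ => exact Or.inl ⟨by omega, by simpa using hsub⟩
        | k + 1, hk =>
            exact Or.inr ((ih (j + 1)).mpr ⟨k, by simpa using hk, by omega, by simpa using hsub⟩)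

-- the content-level keep test coincides with the negation of A's index-based removal test
theorem pvKeep_iff (es : List (List Int)) (i : Nat) (hi : i < es.length) :
    (((es.countP fun f => PySem.Set.equal es[i] f) == 1) &&
      !(es.any fun f => PySem.Set.issubset es[i] f && !PySem.Set.equal es[i] f)) =
      !pvChkA i es[i] es 0 := by
  have hrefl : PySem.Set.equal es[i] es[i] = true := (PySem.Set.equal_iff _ _).mpr fun x => Iff.rfl
  have hsubself : PySem.Set.issubset es[i] es[i] = true :=
    (PySem.Set.issubset_iff _ _).mpr fun x hx => hx
  have hpos : 0 < es.countP (fun f => PySem.Set.equal es[i] f) :=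
    List.countP_pos_iff.mpr ⟨es[i], List.getElem_mem _, hrefl⟩
  cases hc : pvChkA i es[i] es 0 with
  | true =>
      rcases (pvChkA_iff i es[i] es 0).mp hc with ⟨k, hk, hne, hsub⟩
      simp only [Nat.zero_add] at hne
      by_cases heqk : PySem.Set.equal es[i] es[k] = true
      · have h2 : 2 ≤ es.countP (fun f => PySem.Set.equal es[i] f) :=
          pvCountP_two _ es i k hi hk (by omega) hrefl heqk
        have hbeq : ((es.countP fun f => PySem.Set.equal es[i] f) == 1) = false := by
          simp only [beq_eq_false_iff_ne, ne_eq]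
          omega
        simp [hbeq]
      · have hany : (es.any fun f => PySem.Set.issubset es[i] f && !PySem.Set.equal es[i] f) = true := by
          refine List.any_eq_true.mpr ⟨es[k], List.getElem_mem _, ?_⟩
          have : PySem.Set.equal es[i] es[k] = false := by
            cases hx : PySem.Set.equal es[i] es[k]
            · rfl
            · exact absurd hx heqk
          simp [hsub, this]
        simp [hany]
  | false =>
      have hnot : ∀ k (hk : k < es.length), i ≠ k → PySem.Set.issubset es[i] es[k] = false := by
        intro k hk hne
        cases hx : PySem.Set.issubset es[i] es[k]
        · rfl
        · exact absurd ((pvChkA_iff i es[i] es 0).mpr ⟨k, hk, by omega, hx⟩) (by simp [hc])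
      have hcnt : es.countP (fun f => PySem.Set.equal es[i] f) = 1 := by
        by_contra hne1
        have h2 : 2 ≤ es.countP (fun f => PySem.Set.equal es[i] f) := by omega
        obtain ⟨a, b, ha, hb, hab, hpa, hpb⟩ := pvCountP_two_exists _ es h2
        have hone : ∃ k, ∃ hk : k < es.length, i ≠ k ∧ PySem.Set.equal es[i] es[k] = true := by
          by_cases hia : i = a
          · exact ⟨b, hb, by omega, hpb⟩
          · exact ⟨a, ha, hia, hpa⟩
        obtain ⟨k, hk, hik, heq⟩ := hone
        have hsubk : PySem.Set.issubset es[i] es[k] = true :=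
          (PySem.Set.issubset_iff _ _).mpr fun x hx => ((PySem.Set.equal_iff _ _).mp heq x).mp hx
        rw [hnot k hk hik] at hsubk
        cases hsubk
      have hany : (es.any fun f => PySem.Set.issubset es[i] f && !PySem.Set.equal es[i] f) = false := by
        rw [List.any_eq_false]
        intro f hf
        obtain ⟨k, hk, rfl⟩ := List.mem_iff_getElem.mp hf
        by_cases hik : i = k
        · subst hik; simp [hrefl]
        · simp [hnot k hk hik]
      simp [hcnt, hany]

-- index-comprehension removal = content-based filter
theorem pvDropIdxs_eq_filter_aux (rem : List Nat) (P : List Int → Bool) :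
    ∀ (suf : List (List Int)) (i : Nat),
      (∀ k (hk : k < suf.length), rem.contains (i + k) = !P suf[k]) →
      pvDropIdxs rem suf i = suf.filter P := by
  intro suf
  induction suf with
  | nil => intro i _; rfl
  | cons e tl ih =>
      intro i h
      have h0 : rem.contains i = !P e := by simpa using h 0 (by simp)
      have htl : ∀ k (hk : k < tl.length), rem.contains (i + 1 + k) = !P tl[k] := by
        intro k hk
        have := h (k + 1) (by simpa using hk)
        simpa [Nat.add_assoc, Nat.add_comm 1 k] using this
      rw [pvDropIdxs, List.filter_cons]
      by_cases hpe : P e = true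
      · have hcf : rem.contains i = false := by rw [h0, hpe]; rfl
        rw [hcf]
        simp only [Bool.false_eq_true, if_neg, hpe, if_pos, not_false_iff]
        rw [ih (i + 1) htl]
      · have hpe' : P e = false := by cases hx : P e; rfl; exact absurd hx hpe
        have hcf : rem.contains i = true := by rw [h0, hpe']; rfl
        rw [hcf]
        simp only [if_pos, hpe', Bool.false_eq_true, if_neg, not_false_iff]
        rw [ih (i + 1) htl]

theorem pvEdges1_eq_filter (es : List (List Int)) :
    (if (pvToRemA es es 0).isEmpty then es else pvDropIdxs (pvToRemA es es 0) es 0) =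
      es.filter (fun e => ((es.countP fun f => PySem.Set.equal e f) == 1) &&
        !(es.any fun f => PySem.Set.issubset e f && !PySem.Set.equal e f)) := by
  have hcont : ∀ k (hk : k < es.length),
      (pvToRemA es es 0).contains (0 + k) =
        !(((es.countP fun f => PySem.Set.equal es[k] f) == 1) &&
          !(es.any fun f => PySem.Set.issubset es[k] f && !PySem.Set.equal es[k] f)) := by
    intro k hk
    have hmem : k ∈ pvToRemA es es 0 ↔ pvChkA k es[k] es 0 = true := by
      rw [pvToRemA_mem]
      constructor
      · rintro ⟨k', hk', hkk, hch⟩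
        have : k' = k := by omega
        subst this
        simpa using hch
      · intro hch
        exact ⟨k, hk, by omega, by simpa using hch⟩
    rw [pvKeep_iff es k hk, Bool.not_not]
    simp only [Nat.zero_add]
    cases hx : pvChkA k es[k] es 0
    · have : k ∉ pvToRemA es es 0 := fun hm => by rw [hmem.mp hm] at hx; cases hx
      simpa using this
    · have : k ∈ pvToRemA es es 0 := hmem.mpr hx
      simpa using this
  by_cases hrem : (pvToRemA es es 0).isEmpty = true
  · rw [if_pos hrem]
    have hnil : pvToRemA es es 0 = [] := List.isEmpty_iff.mp hrem
    symm
    rw [List.filter_eq_self]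
    intro e he
    obtain ⟨k, hk, rfl⟩ := List.mem_iff_getElem.mp he
    have hthis := hcont k hk
    rw [hnil] at hthis
    cases hx : (((es.countP fun f => PySem.Set.equal es[k] f) == 1) &&
        !(es.any fun f => PySem.Set.issubset es[k] f && !PySem.Set.equal es[k] f))
    · rw [hx] at hthis; simp at hthis
    · rfl
  · rw [if_neg hrem]
    exact pvDropIdxs_eq_filter_aux _ _ es 0 hcont

-- A's var_count lookup computes flattened counts too
theorem pvFoldInsert_getD (keys : List Int) (f : Int → Int) :
    ∀ (d : PySem.Dict Int Int) (v : Int),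
      (keys.foldl (fun d u => d.insert u (f u)) d).getD v 0 = if v ∈ keys then f v else d.getD v 0 := by
  induction keys with
  | nil => intro d v; simp
  | cons x keys ih =>
      intro d v
      rw [List.foldl_cons, ih]
      by_cases hv : v ∈ keys
      · simp [hv]
      · by_cases hvx : v = x <;> simp [hv, hvx, PySem.Dict.getD_insert]

theorem pvVarCountA_getD (es : List (List Int)) (v : Int) :
    (pvVarCountA es).getD v 0 = ((pvAllVars es).count v : Int) := by
  unfold pvVarCountA
  rw [pvFoldInsert_getD]
  by_cases hv : v ∈ PySem.Set.ofList (pvAllVars es)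
  · simp [hv]
  · have hv' : v ∉ pvAllVars es := fun h => hv ((PySem.Set.mem_ofList _ _).mpr h)
    simp [hv, List.count_eq_zero.mpr hv']

-- A's rule-2 filter predicate = B's shared-set membership
theorem pvRule2Pred_eq (surv : List (List Int)) :
    (fun v => decide ((pvVarCountA surv).getD v 0 > 1)) =
      (fun v => PySem.Set.contains (pvShared surv) v) := by
  funext v
  rw [pvShared_contains, pvVarCountA_getD]
  by_cases h : 1 < (pvAllVars surv).count v
  · rw [decide_eq_true h, decide_eq_true (show ((pvAllVars surv).count v : Int) > 1 by exact_mod_cast h)]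
  · rw [decide_eq_false h, decide_eq_false (show ¬ (((pvAllVars surv).count v : Int) > 1) by
      intro hx; exact h (by exact_mod_cast hx))]

-- one A-iteration body equals B's step function
theorem pvStepA_eq_stepB (es : List (List Int)) :
    pvRule2 (pvVarCountA (if (pvToRemA es es 0).isEmpty then es else pvDropIdxs (pvToRemA es es 0) es 0))
        (if (pvToRemA es es 0).isEmpty then es else pvDropIdxs (pvToRemA es es 0) es 0) = pvStepB es := by
  have hsurv : pvSurvB es = es.filter (fun e => ((es.countP fun f => PySem.Set.equal e f) == 1) &&
      !(es.any fun f => PySem.Set.issubset e f && !PySem.Set.equal e f)) := by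
    rw [pvSurvB]
    exact List.filter_congr (fun e _ => pvKeepB_eq es e)
  rw [pvStepB_shape, pvEdges1_eq_filter, pvRule2_eq_filterMap]
  have hq : es.filter (fun e =>
      (pvMGet (es.foldl pvMAdd []) e == 1) &&
      !((es.foldl pvMAdd []).any (fun fc => PySem.Set.issubset e fc.1 && !PySem.Set.equal e fc.1))) =
      pvSurvB es := rfl
  rw [hq, hsurv]
  have hp := pvRule2Pred_eq (es.filter (fun e => ((es.countP fun f => PySem.Set.equal e f) == 1) &&
      !(es.any fun f => PySem.Set.issubset e f && !PySem.Set.equal e f)))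
  rw [← hsurv] at hp
  rw [← hsurv]
  rw [← hp]

-- a rule-2 fixpoint under Python list-of-sets equality is a literal fixpoint
theorem pvListSetEq_cons (x y : List Int) (xs ys : List (List Int)) :
    pvListSetEq (x :: xs) (y :: ys) = (PySem.Set.equal x y && pvListSetEq xs ys) := by
  simp only [pvListSetEq, List.length_cons, List.zip_cons_cons, List.all_cons]
  have hl : (xs.length + 1 == ys.length + 1) = (xs.length == ys.length) := by
    simp
  rw [hl]
  cases (xs.length == ys.length) <;> cases PySem.Set.equal x y <;> simp

theorem pvR2_eq_of_listSetEq (p : Int → Bool) : ∀ (es : List (List Int)),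
    pvListSetEq (es.filterMap (fun e => if (e.filter p).isEmpty then none else some (e.filter p))) es = true →
    es.filterMap (fun e => if (e.filter p).isEmpty then none else some (e.filter p)) = es := by
  intro es
  induction es with
  | nil => intro _; rfl
  | cons e tl ih =>
      intro h
      by_cases hem : (e.filter p).isEmpty = true
      · exfalso
        rw [List.filterMap_cons_none (by simp [hem])] at h
        have hlen := pvListSetEq_length h
        have := List.length_filterMap_le
          (fun e => if (e.filter p).isEmpty then none else some (e.filter p)) tl
        simp only [List.length_cons] at hlen
        omega
      · simp only [List.filterMap_cons, if_neg hem] at h ⊢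
        rw [pvListSetEq_cons, Bool.and_eq_true] at h
        have hhead : e.filter p = e := by
          rw [List.filter_eq_self]
          intro a ha
          exact List.mem_filter.mp (((PySem.Set.equal_iff _ _).mp h.1 a).mpr ha) |>.2
        rw [hhead, ih h.2]

theorem pv_loopA_eq_reduceB (es : List (List Int)) : pvLoopA es = (pvReduceB es).isEmpty := by
  rw [pvLoopA, pvReduceB]
  by_cases hch : (pvToRemA es es 0).isEmpty = false ∨
      pvListSetEq (pvRule2 (pvVarCountA (if (pvToRemA es es 0).isEmpty then es else pvDropIdxs (pvToRemA es es 0) es 0))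
        (if (pvToRemA es es 0).isEmpty then es else pvDropIdxs (pvToRemA es es 0) es 0))
        (if (pvToRemA es es 0).isEmpty then es else pvDropIdxs (pvToRemA es es 0) es 0) = false
  · rw [dif_pos hch]
    have hBfalse : pvListSetEq (pvStepB es) es = false := by
      by_cases hre : (pvToRemA es es 0).isEmpty = true
      · have he1 : (if (pvToRemA es es 0).isEmpty then es else pvDropIdxs (pvToRemA es es 0) es 0) = es :=
          if_pos hre
        rcases hch with hc | hc
        · rw [hre] at hc; cases hc
        · rw [← pvStepA_eq_stepB es]
          rw [he1] at hc ⊢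
          exact hc
      · have hre' : (pvToRemA es es 0).isEmpty = false := by
          cases hx : (pvToRemA es es 0).isEmpty
          · rfl
          · exact absurd hx hre
        have hlen := pvRemNonempty_len es hre'
        have he1 : (if (pvToRemA es es 0).isEmpty then es else pvDropIdxs (pvToRemA es es 0) es 0) =
            pvDropIdxs (pvToRemA es es 0) es 0 := by rw [if_neg (by simp [hre'])]
        apply pvListSetEq_false_of_length
        rw [← pvStepA_eq_stepB es, he1, pvRule2_eq_filterMap]
        have := List.length_filterMap_le
          (fun e => if (e.filter (fun v => (pvVarCountA (pvDropIdxs (pvToRemA es es 0) es 0)).getD v 0 > 1)).isEmpty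
            then none
            else some (e.filter (fun v => (pvVarCountA (pvDropIdxs (pvToRemA es es 0) es 0)).getD v 0 > 1)))
          (pvDropIdxs (pvToRemA es es 0) es 0)
        omega
    rw [dif_neg (by simp [hBfalse])]
    have harg : (if pvListSetEq (pvRule2 (pvVarCountA (if (pvToRemA es es 0).isEmpty then es else pvDropIdxs (pvToRemA es es 0) es 0))
          (if (pvToRemA es es 0).isEmpty then es else pvDropIdxs (pvToRemA es es 0) es 0))
          (if (pvToRemA es es 0).isEmpty then es else pvDropIdxs (pvToRemA es es 0) es 0) then
            (if (pvToRemA es es 0).isEmpty then es else pvDropIdxs (pvToRemA es es 0) es 0)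
          else pvRule2 (pvVarCountA (if (pvToRemA es es 0).isEmpty then es else pvDropIdxs (pvToRemA es es 0) es 0))
            (if (pvToRemA es es 0).isEmpty then es else pvDropIdxs (pvToRemA es es 0) es 0)) =
        pvStepB es := by
      by_cases hq : pvListSetEq (pvRule2 (pvVarCountA (if (pvToRemA es es 0).isEmpty then es else pvDropIdxs (pvToRemA es es 0) es 0))
          (if (pvToRemA es es 0).isEmpty then es else pvDropIdxs (pvToRemA es es 0) es 0))
          (if (pvToRemA es es 0).isEmpty then es else pvDropIdxs (pvToRemA es es 0) es 0) = true
      · rw [if_pos hq, ← pvStepA_eq_stepB es]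
        rw [pvRule2_eq_filterMap] at hq ⊢
        exact (pvR2_eq_of_listSetEq _ _ hq).symm
      · rw [if_neg hq]
        exact pvStepA_eq_stepB es
    rw [harg]
    exact pv_loopA_eq_reduceB (pvStepB es)
  · rw [dif_neg hch]
    rw [not_or] at hch
    obtain ⟨h1, h2⟩ := hch
    have h1' : (pvToRemA es es 0).isEmpty = true := by
      cases hx : (pvToRemA es es 0).isEmpty
      · exact absurd hx h1
      · rfl
    have h2' : pvListSetEq (pvRule2 (pvVarCountA (if (pvToRemA es es 0).isEmpty then es else pvDropIdxs (pvToRemA es es 0) es 0))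
        (if (pvToRemA es es 0).isEmpty then es else pvDropIdxs (pvToRemA es es 0) es 0))
        (if (pvToRemA es es 0).isEmpty then es else pvDropIdxs (pvToRemA es es 0) es 0) = true := by
      cases hx : pvListSetEq (pvRule2 (pvVarCountA (if (pvToRemA es es 0).isEmpty then es else pvDropIdxs (pvToRemA es es 0) es 0))
          (if (pvToRemA es es 0).isEmpty then es else pvDropIdxs (pvToRemA es es 0) es 0))
          (if (pvToRemA es es 0).isEmpty then es else pvDropIdxs (pvToRemA es es 0) es 0)
      · exact absurd hx h2
      · rfl
    have he1 : (if (pvToRemA es es 0).isEmpty then es else pvDropIdxs (pvToRemA es es 0) es 0) = es :=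
      if_pos h1'
    have hB : pvListSetEq (pvStepB es) es = true := by
      rw [← pvStepA_eq_stepB es]
      rw [he1] at h2' ⊢
      exact h2'
    rw [dif_pos hB]
    cases es <;> rfl
termination_by pvSize es
decreasing_by exact pvDecB es hBfalse

-- ===== VERDICT (by name: the statement is the Claim_ definition above) =====
theorem gyo_reduce_spec : Claim_equal_gyo_reduce := by
  intro hs _
  unfold Spec_gyo_reduce gyo_reduce gyo_reduce_alt
  exact pv_loopA_eq_reduceB (hs.map PySem.Set.ofList)
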